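-- pv_equiv track=rewrite | github.com/Parveen-Birthaliya/DocuAI | src/rag/rag_answerer.py | _mock_generate
-- ===== SOURCE A (Python) =====
-- def _mock_generate(prompt: str) -> str:
--     """Mock LLM generation for testing"""
--     # Simple mock: extract relevant parts
--     lines = prompt.split('\n')
--
--     # Find the "Answer:" line and extract following content
--     answer_idx = None
--     for i, line in enumerate(lines):
--         if "Answer:" in line:
--             answer_idx = i
--             break
--
--     if answer_idx is not None and answer_idx < len(lines) - 1:
--         answer = '\n'.join(lines[answer_idx+1:]).strip()
--     else:
--         answer = "Based on the provided context, I can answer your question about the relevant information."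
--
--     return answer[:500]  # Limit to max_tokens
-- ===== SOURCE B (Python) =====
-- FALLBACK = "Based on the provided context, I can answer your question about the relevant information."
--
--
-- def _mock_generate(prompt: str) -> str:
--     """Mock LLM generation for testing (offset-based: no line list is built)"""
--     pos = prompt.find("Answer:")
--     if pos >= 0:
--         nl = prompt.find("\n", pos)
--         if nl >= 0:
--             return prompt[nl + 1:].strip()[:500]
--     return FALLBACK
-- ===== Notes on version B (the rewrite author's own statement) =====
-- stated objective: simpler
-- what changed: Replaces A's split-into-a-line-list plus an enumerate loop and a join of the tail lines with direct string-offset arithmetic: one find for the answer marker, one find for the newline after it, and a single slice of the original prompt.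
import Mathlib
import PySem

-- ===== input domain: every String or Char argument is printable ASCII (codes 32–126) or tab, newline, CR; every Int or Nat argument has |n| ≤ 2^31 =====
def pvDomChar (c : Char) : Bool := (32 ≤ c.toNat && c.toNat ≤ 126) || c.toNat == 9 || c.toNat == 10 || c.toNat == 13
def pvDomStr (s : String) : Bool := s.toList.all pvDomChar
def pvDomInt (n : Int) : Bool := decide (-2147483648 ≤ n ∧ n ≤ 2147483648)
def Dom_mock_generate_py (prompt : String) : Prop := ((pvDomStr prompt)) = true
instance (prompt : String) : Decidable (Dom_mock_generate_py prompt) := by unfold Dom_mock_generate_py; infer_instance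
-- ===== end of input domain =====

-- B replaces A's line-list + loop + join with two find calls and one slice of the prompt (objective: simpler).

-- ===== PORT A =====
def pvFallback : List Char :=
  "Based on the provided context, I can answer your question about the relevant information.".toList

-- the 'for i, line in enumerate(lines): if "Answer:" in line: …; break' loop
def pvAnswerIdxA : List (List Char) → Int → Option Int
  | [], _ => none
  | l :: ls, i => if PySem.Chars.isIn "Answer:".toList l then some i else pvAnswerIdxA ls (i + 1)

def pvRunA (cs : List Char) : String :=
  let lines := PySem.Chars.splitOn cs ['\n']
  let answer_idx := pvAnswerIdxA lines 0
  let answer : List Char :=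
    match answer_idx with
    | some i =>
        if i < (lines.length : Int) - 1 then
          PySem.Chars.strip (PySem.Chars.join ['\n'] (PySem.List.slice lines (some (i + 1)) none))
        else pvFallback
    | none => pvFallback
  String.ofList (PySem.List.slice answer none (some 500))

def mock_generate_py (prompt : String) : String := pvRunA prompt.toList

-- ===== PORT B =====
def pvRunB (cs : List Char) : String :=
  let pos := PySem.Chars.find cs "Answer:".toList
  if 0 ≤ pos then
    let nl := PySem.Chars.findFrom cs ['\n'] pos none
    if 0 ≤ nl then
      String.ofList (PySem.List.slice (PySem.Chars.strip (PySem.List.slice cs (some (nl + 1)) none)) none (some 500))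
    else String.ofList pvFallback
  else String.ofList pvFallback

def mock_generate_py_alt (prompt : String) : String := pvRunB prompt.toList

-- ===== PRECONDITION & SPEC =====
def Spec_mock_generate_py (prompt : String) (out : String) : Prop := out = mock_generate_py_alt prompt
instance (prompt : String) (out : String) : Decidable (Spec_mock_generate_py prompt out) := by unfold Spec_mock_generate_py; infer_instance

-- ===== CLAIM (what is proved, stated in full; the proofs are below) =====
def Claim_equal_mock_generate_py : Prop := ∀ (prompt : String), Dom_mock_generate_py prompt → Spec_mock_generate_py prompt (mock_generate_py prompt)

-- ===== LEMMAS AND PROOFS =====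

def pvSp (c : Char) : List Char → List (List Char)
  | [] => [[]]
  | x :: xs => if x = c then [] :: pvSp c xs else (pvSp c xs).modifyHead (x :: ·)

theorem pvSp_ne_nil (c : Char) (cs : List Char) : pvSp c cs ≠ [] := by
  induction cs with
  | nil => simp [pvSp]
  | cons x xs ih =>
    simp only [pvSp]
    split
    · simp
    · cases h : pvSp c xs with
      | nil => exact absurd h ih
      | cons a t => simp [List.modifyHead]

theorem pvGo_spec (c : Char) : ∀ (fuel : Nat) (l cur : List Char) (acc : List (List Char)),
    l.length < fuel →
    PySem.Chars.splitOn.go [c] fuel l cur acc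
      = acc.reverse ++ (pvSp c l).modifyHead (cur.reverse ++ ·) := by
  intro fuel
  induction fuel with
  | zero => intro l cur acc h; omega
  | succ n ih =>
    intro l cur acc h
    cases l with
    | nil => simp [PySem.Chars.splitOn.go, pvSp]
    | cons x rest =>
      simp only [PySem.Chars.splitOn.go]
      by_cases hx : x = c
      · subst hx
        have hpre : [x].isPrefixOf (x :: rest) = true := by simp [List.isPrefixOf]
        simp only [hpre, if_pos]
        rw [ih _ [] _ (by simpa using Nat.lt_of_succ_lt_succ h)]
        simp [pvSp, List.modifyHead]
        cases hsp : pvSp x rest <;> simp [List.modifyHead]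
      · have hpre : [c].isPrefixOf (x :: rest) = false := by
          simp [List.isPrefixOf]; exact fun hcx => (hx hcx.symm).elim
        simp only [hpre, if_neg, Bool.false_eq_true, not_false_iff]
        rw [ih _ (x :: cur) _ (by simpa using Nat.lt_of_succ_lt_succ h)]
        have hne := pvSp_ne_nil c rest
        cases hsp : pvSp c rest with
        | nil => exact absurd hsp hne
        | cons hh tt => simp [pvSp, hx, hsp, List.modifyHead]

theorem pvSplitOn_eq_sp (c : Char) (cs : List Char) :
    PySem.Chars.splitOn cs [c] = pvSp c cs := by
  unfold PySem.Chars.splitOn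
  rw [pvGo_spec c (cs.length + 1) cs [] [] (by omega)]
  cases h : pvSp c cs with
  | nil => exact absurd h (pvSp_ne_nil c cs)
  | cons a t => simp

theorem pvJoin_sp (c : Char) (cs : List Char) :
    PySem.Chars.join [c] (pvSp c cs) = cs := by
  induction cs with
  | nil => simp [pvSp, PySem.Chars.join_singleton]
  | cons x xs ih =>
    simp only [pvSp]
    by_cases hx : x = c
    · subst hx
      cases h : pvSp x xs with
      | nil => exact absurd h (pvSp_ne_nil x xs)
      | cons a t =>
        rw [if_pos rfl, PySem.Chars.join_cons_cons]
        rw [h] at ih; simp [ih]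
    · rw [if_neg hx]
      cases h : pvSp c xs with
      | nil => exact absurd h (pvSp_ne_nil c xs)
      | cons a t =>
        rw [h] at ih
        cases t with
        | nil => simp_all [PySem.Chars.join_singleton]
        | cons b t2 =>
          simp only [List.modifyHead]
          rw [PySem.Chars.join_cons_cons] at ih ⊢
          simp [ih]

theorem pvSp_no_sep {c : Char} {cs : List Char} (h : c ∉ cs) : pvSp c cs = [cs] := by
  induction cs with
  | nil => simp [pvSp]
  | cons x xs ih =>
    simp only [List.mem_cons, not_or] at h
    simp [pvSp, Ne.symm, h.1, ih h.2]

theorem pvSp_append {c : Char} {l0 : List Char} (tl : List Char) (h : c ∉ l0) :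
    pvSp c (l0 ++ c :: tl) = l0 :: pvSp c tl := by
  induction l0 with
  | nil => simp [pvSp]
  | cons x xs ih =>
    simp only [List.mem_cons, not_or] at h
    have hx : x ≠ c := fun hh => h.1 hh.symm
    simp [pvSp, hx, ih h.2, List.modifyHead]

theorem pvPrefix_append_left {sub a : List Char} {b : List Char}
    (h : sub <+: a ++ b) (hl : sub.length ≤ a.length) : sub <+: a := by
  exact (List.isPrefix_append_of_length hl).mp h

theorem pvOcc_in_left {c : Char} {sub l0 tl : List Char} {i : Nat}
    (hc : c ∉ sub) (hne : sub ≠ []) (h : sub <+: l0.drop i ++ c :: tl)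
    (hi : i ≤ l0.length) : i + sub.length ≤ l0.length := by
  by_contra hlt
  have hj : l0.length - i < sub.length := by omega
  have hget := h.getElem hj
  have hlen : (l0.drop i).length = l0.length - i := by simp
  have hc2 : (l0.drop i ++ c :: tl)[l0.length - i]'(by simp) = c := by
    rw [List.getElem_append_right (by omega)]
    simp [hlen]
  exact hc ((hget.trans hc2) ▸ List.getElem_mem hj)

theorem pvFind_eq_of {cs sub : List Char} {k : Nat} (h1 : sub <+: cs.drop k)
    (h2 : ∀ i < k, ¬ sub <+: cs.drop i) : PySem.Chars.find cs sub = k := by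
  have hinf : sub <:+: cs := h1.isInfix.trans (List.drop_suffix k cs).isInfix
  have hnn : 0 ≤ PySem.Chars.find cs sub := (PySem.Chars.find_nonneg_iff cs sub).mpr hinf
  obtain ⟨hocc, hmin⟩ := PySem.Chars.find_spec hnn
  have htn : (PySem.Chars.find cs sub).toNat = k := by
    rcases Nat.lt_trichotomy (PySem.Chars.find cs sub).toNat k with hlt | heq | hgt
    · exact absurd hocc (h2 _ hlt)
    · exact heq
    · exact absurd h1 (hmin k hgt)
  omega

theorem pvFind_single {c : Char} {a : List Char} (b : List Char) (h : c ∉ a) :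
    PySem.Chars.find (a ++ c :: b) [c] = a.length := by
  apply pvFind_eq_of (k := a.length)
  · simp [List.drop_left]
  · intro i hi hp
    rw [List.drop_append_of_le_length (by omega), List.drop_eq_getElem_cons hi] at hp
    obtain ⟨t, ht⟩ := hp
    simp only [List.singleton_append, List.cons_append, List.cons.injEq] at ht
    exact h (ht.1 ▸ List.getElem_mem hi)

theorem pvDrop_right (l0 tl : List Char) (c : Char) (j : Nat) (hj : l0.length + 1 ≤ j) :
    (l0 ++ c :: tl).drop j = tl.drop (j - l0.length - 1) := by
  have h1 : (l0 ++ c :: tl).drop j = ((l0 ++ [c]) ++ tl).drop ((l0 ++ [c]).length + (j - l0.length - 1)) := by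
    congr 1
    · simp; omega
    · simp
  rw [h1, List.drop_append]
  have hz : (l0 ++ [c]).drop ((l0 ++ [c]).length + (j - l0.length - 1)) = [] :=
    List.drop_eq_nil_of_le (by simp)
  rw [hz, List.nil_append]
  congr 1
  simp

theorem pvFind_append_found {c : Char} {sub l0 : List Char} (tl : List Char)
    (hc : c ∉ sub) (hne : sub ≠ []) (h : sub <:+: l0) :
    PySem.Chars.find (l0 ++ c :: tl) sub = PySem.Chars.find l0 sub := by
  have hnn : 0 ≤ PySem.Chars.find l0 sub := (PySem.Chars.find_nonneg_iff l0 sub).mpr h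
  obtain ⟨ho, hm⟩ := PySem.Chars.find_spec hnn
  have hle : (PySem.Chars.find l0 sub).toNat ≤ l0.length := by
    have := PySem.Chars.find_le_length l0 sub; omega
  have : PySem.Chars.find (l0 ++ c :: tl) sub = ((PySem.Chars.find l0 sub).toNat : Int) := by
    apply pvFind_eq_of
    · rw [List.drop_append_of_le_length hle]
      exact ho.trans (List.prefix_append _ _)
    · intro i hilt hp
      have hi : i ≤ l0.length := by omega
      rw [List.drop_append_of_le_length hi] at hp
      have hend := pvOcc_in_left hc hne hp hi
      have hsub := pvPrefix_append_left hp (by simp; omega)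
      exact hm i hilt hsub
  omega

theorem pvFind_append_not_found {c : Char} {sub l0 : List Char} (tl : List Char)
    (hc : c ∉ sub) (hne : sub ≠ []) (h : ¬ sub <:+: l0) :
    PySem.Chars.find (l0 ++ c :: tl) sub
      = if PySem.Chars.find tl sub = -1 then -1
        else (l0.length : Int) + 1 + PySem.Chars.find tl sub := by
  have noLeft : ∀ i ≤ l0.length, ¬ sub <+: (l0 ++ c :: tl).drop i := by
    intro i hi hp
    rw [List.drop_append_of_le_length hi] at hp
    have hend := pvOcc_in_left hc hne hp hi
    have hsub := pvPrefix_append_left hp (by simp; omega)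
    exact h (hsub.isInfix.trans (List.drop_suffix i l0).isInfix)
  by_cases hfin : PySem.Chars.find tl sub = -1
  · rw [if_pos hfin]
    rw [PySem.Chars.find_eq_neg_one_iff]
    intro hinf
    have hIn : PySem.Chars.isIn sub (l0 ++ c :: tl) = true :=
      (PySem.Chars.isIn_iff_infix _ _).mpr hinf
    obtain ⟨j, hj⟩ := (PySem.Chars.exists_prefix_drop_iff_isIn sub (l0 ++ c :: tl)).mpr hIn
    by_cases hjl : j ≤ l0.length
    · exact noLeft j hjl hj
    · rw [pvDrop_right l0 tl c j (by omega)] at hj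
      have : sub <:+: tl := hj.isInfix.trans (List.drop_suffix _ tl).isInfix
      exact (PySem.Chars.find_eq_neg_one_iff tl sub).mp hfin this
  · rw [if_neg hfin]
    have hk : 0 ≤ PySem.Chars.find tl sub := by
      have := PySem.Chars.neg_one_le_find tl sub; omega
    obtain ⟨ho, hm⟩ := PySem.Chars.find_spec hk
    have : PySem.Chars.find (l0 ++ c :: tl) sub
        = ((l0.length + 1 + (PySem.Chars.find tl sub).toNat : Nat) : Int) := by
      apply pvFind_eq_of
      · rw [pvDrop_right l0 tl c _ (by omega)]
        have : l0.length + 1 + (PySem.Chars.find tl sub).toNat - l0.length - 1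
            = (PySem.Chars.find tl sub).toNat := by omega
        rw [this]; exact ho
      · intro i hilt hp
        by_cases hi : i ≤ l0.length
        · exact noLeft i hi hp
        · rw [pvDrop_right l0 tl c i (by omega)] at hp
          exact hm (i - l0.length - 1) (by omega) hp
    omega

theorem pvAnswerIdxA_shift (ls : List (List Char)) (i : Int) :
    pvAnswerIdxA ls i = (pvAnswerIdxA ls 0).map (· + i) := by
  induction ls generalizing i with
  | nil => simp [pvAnswerIdxA]
  | cons l ls ih =>
    simp only [pvAnswerIdxA]
    split
    · simp
    · rw [ih (i + 1), ih (0 + 1), Option.map_map]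
      congr 1
      funext j
      simp [Function.comp]
      omega

theorem pvAnswerIdxA_nonneg {ls : List (List Char)} {i j : Int}
    (h : pvAnswerIdxA ls i = some j) : i ≤ j := by
  induction ls generalizing i with
  | nil => simp [pvAnswerIdxA] at h
  | cons l ls ih =>
    simp only [pvAnswerIdxA] at h
    split at h
    · injection h with h'
      omega
    · have := ih h; omega

theorem pvFallback_trunc : PySem.List.slice pvFallback none (some 500) = pvFallback := by
  rw [PySem.List.slice_to _ (by omega : (0:Int) ≤ 500)]
  apply List.take_of_length_le
  decide

theorem pvCase_noNL {cs : List Char} (h : '\n' ∉ cs) : pvRunA cs = pvRunB cs := by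
  have hA : pvRunA cs = String.ofList pvFallback := by
    simp only [pvRunA, pvSplitOn_eq_sp, pvSp_no_sep h, pvAnswerIdxA]
    have hlit : "Answer:".toList = ['A', 'n', 's', 'w', 'e', 'r', ':'] := rfl
    by_cases hIn : PySem.Chars.isIn ['A', 'n', 's', 'w', 'e', 'r', ':'] cs = true
    · simp [hlit, hIn, pvFallback_trunc]
    · simp [hlit, hIn, pvFallback_trunc]
  rw [hA]
  simp only [pvRunB]
  by_cases hpos : (0:Int) ≤ PySem.Chars.find cs "Answer:".toList
  · have hle : (PySem.Chars.find cs "Answer:".toList).toNat ≤ cs.length := by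
      have := PySem.Chars.find_le_length cs "Answer:".toList; omega
    have hcast : PySem.Chars.find cs "Answer:".toList
        = ((PySem.Chars.find cs "Answer:".toList).toNat : Int) := by omega
    have hnofind : PySem.Chars.find (cs.drop (PySem.Chars.find cs "Answer:".toList).toNat) ['\n'] = -1 := by
      rw [PySem.Chars.find_eq_neg_one_iff]
      intro hinf
      exact h (List.drop_subset _ cs (hinf.subset (List.mem_singleton_self '\n')))
    rw [if_pos hpos, hcast, PySem.Chars.findFrom_natCast _ _ _ hle, hnofind]
    simp
  · rw [if_neg hpos]

theorem pvCase_hit {l0 : List Char} (tl : List Char) (h0 : '\n' ∉ l0)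
    (hhit : "Answer:".toList <:+: l0) :
    pvRunA (l0 ++ '\n' :: tl) = pvRunB (l0 ++ '\n' :: tl) := by
  have hAnl : '\n' ∉ "Answer:".toList := by decide
  have hAne : "Answer:".toList ≠ [] := by decide
  have hspne := pvSp_ne_nil '\n' tl
  have hsplen : 0 < (pvSp '\n' tl).length := List.length_pos_iff.mpr hspne
  -- A side
  have hA : pvRunA (l0 ++ '\n' :: tl)
      = String.ofList (PySem.List.slice (PySem.Chars.strip tl) none (some 500)) := by
    simp only [pvRunA, pvSplitOn_eq_sp, pvSp_append tl h0, pvAnswerIdxA,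
      (PySem.Chars.isIn_iff_infix _ _).mpr hhit, if_pos]
    have hcond : (0:Int) < ((l0 :: pvSp '\n' tl).length : Int) - 1 := by
      simp only [List.length_cons]; push_cast; omega
    rw [if_pos hcond]
    have hslice : PySem.List.slice (l0 :: pvSp '\n' tl) (some (0 + 1)) none = pvSp '\n' tl := by
      rw [PySem.List.slice_from _ (by omega : (0:Int) ≤ 0 + 1)]
      simp
    rw [hslice, pvJoin_sp]
  rw [hA]
  -- B side
  have hp : PySem.Chars.find (l0 ++ '\n' :: tl) "Answer:".toList
      = PySem.Chars.find l0 "Answer:".toList := pvFind_append_found tl hAnl hAne hhit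
  have hpos : (0:Int) ≤ PySem.Chars.find l0 "Answer:".toList :=
    (PySem.Chars.find_nonneg_iff _ _).mpr hhit
  set p := PySem.Chars.find l0 "Answer:".toList with hpdef
  have hple : p.toNat ≤ l0.length := by
    have := PySem.Chars.find_le_length l0 "Answer:".toList; omega
  have hple' : p.toNat ≤ (l0 ++ '\n' :: tl).length := by simp; omega
  have hnl : PySem.Chars.findFrom (l0 ++ '\n' :: tl) ['\n'] p none = (l0.length : Int) := by
    have hcast : p = (p.toNat : Int) := by omega
    rw [hcast, PySem.Chars.findFrom_natCast _ _ _ hple']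
    have hdrop : (l0 ++ '\n' :: tl).drop p.toNat = l0.drop p.toNat ++ '\n' :: tl :=
      List.drop_append_of_le_length hple
    have hnotin : '\n' ∉ l0.drop p.toNat := fun hm => h0 (List.drop_subset _ l0 hm)
    rw [hdrop, pvFind_single tl hnotin]
    have : ((l0.drop p.toNat).length : Int) = (l0.length : Int) - p.toNat := by simp; omega
    rw [this]
    rw [if_neg (by omega)]
    omega
  simp only [pvRunB, ← hpdef, hp, if_pos hpos, hnl]
  rw [if_pos (by positivity)]
  have hslice : PySem.List.slice (l0 ++ '\n' :: tl) (some ((l0.length : Int) + 1)) none = tl := by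
    rw [show (l0.length : Int) + 1 = ((l0.length + 1 : Nat) : Int) by push_cast; ring]
    rw [PySem.List.slice_from _ (by positivity)]
    rw [Int.toNat_natCast, pvDrop_right l0 tl '\n' (l0.length + 1) le_rfl]
    simp
  rw [hslice]

theorem pvCase_missA {l0 : List Char} (tl : List Char) (h0 : '\n' ∉ l0)
    (hmiss : ¬ "Answer:".toList <:+: l0) :
    pvRunA (l0 ++ '\n' :: tl) = pvRunA tl := by
  have hIn : PySem.Chars.isIn "Answer:".toList l0 = false :=
    (PySem.Chars.isIn_eq_false_iff _ _).mpr hmiss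
  simp only [pvRunA, pvSplitOn_eq_sp, pvSp_append tl h0, pvAnswerIdxA, hIn,
    Bool.false_eq_true, if_false]
  rw [pvAnswerIdxA_shift (pvSp '\n' tl) (0 + 1)]
  cases hbase : pvAnswerIdxA (pvSp '\n' tl) 0 with
  | none => simp
  | some j =>
    have hj : (0:Int) ≤ j := pvAnswerIdxA_nonneg hbase
    simp only [Option.map_some]
    by_cases hcond : j < ((pvSp '\n' tl).length : Int) - 1
    · rw [if_pos (by simp only [List.length_cons]; push_cast; omega), if_pos hcond]
      have hsl : PySem.List.slice (l0 :: pvSp '\n' tl) (some (j + (0 + 1) + 1)) none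
          = PySem.List.slice (pvSp '\n' tl) (some (j + 1)) none := by
        rw [PySem.List.slice_from _ (by omega), PySem.List.slice_from _ (by omega)]
        rw [show (j + (0 + 1) + 1).toNat = (j + 1).toNat + 1 by omega]
        rw [List.drop_succ_cons]
      rw [hsl]
    · rw [if_neg (by simp only [List.length_cons]; push_cast; omega), if_neg hcond]

theorem pvCase_missB {l0 : List Char} (tl : List Char) (h0 : '\n' ∉ l0)
    (hmiss : ¬ "Answer:".toList <:+: l0) :
    pvRunB (l0 ++ '\n' :: tl) = pvRunB tl := by
  have hAnl : '\n' ∉ "Answer:".toList := by decide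
  have hAne : "Answer:".toList ≠ [] := by decide
  have hf := pvFind_append_not_found tl hAnl hAne hmiss
  by_cases hfin : PySem.Chars.find tl "Answer:".toList = -1
  · rw [if_pos hfin] at hf
    simp only [pvRunB, hf, hfin]
    rw [if_neg (by omega), if_neg (by omega)]
  · rw [if_neg hfin] at hf
    set k' := PySem.Chars.find tl "Answer:".toList with hk'def
    have hk' : (0:Int) ≤ k' := by
      have := PySem.Chars.neg_one_le_find tl "Answer:".toList; omega
    have hk'le : k'.toNat ≤ tl.length := by
      have := PySem.Chars.find_le_length tl "Answer:".toList; omega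
    set L := l0.length with hLdef
    have hlen : ((l0 ++ '\n' :: tl)).length = L + 1 + tl.length := by
      simp only [List.length_append, List.length_cons]; omega
    have hdropN : (l0 ++ '\n' :: tl).drop (L + 1 + k'.toNat) = tl.drop k'.toNat := by
      rw [pvDrop_right l0 tl '\n' _ (by omega)]
      congr 1; omega
    set m := PySem.Chars.find (tl.drop k'.toNat) ['\n'] with hmdef
    have hcast1 : (L : Int) + 1 + k' = ((L + 1 + k'.toNat : Nat) : Int) := by push_cast; omega
    have hffcs : PySem.Chars.findFrom (l0 ++ '\n' :: tl) ['\n'] ((L : Int) + 1 + k') none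
        = if m = -1 then -1 else (L : Int) + 1 + k' + m := by
      rw [hcast1, PySem.Chars.findFrom_natCast _ _ _ (by rw [hlen]; omega), hdropN, ← hmdef]
      all_goals split
      all_goals push_cast
      all_goals omega
    have hfftl : PySem.Chars.findFrom tl ['\n'] k' none
        = if m = -1 then -1 else k' + m := by
      rw [show k' = ((k'.toNat : Nat) : Int) by omega, PySem.Chars.findFrom_natCast _ _ _ hk'le, ← hmdef]
      all_goals split
      all_goals omega
    simp only [pvRunB, hf, ← hk'def, ← hLdef, hffcs, hfftl]
    rw [if_pos (by omega), if_pos hk']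
    by_cases hm : m = -1
    · rw [if_pos hm, if_pos hm]
      rw [if_neg (by omega), if_neg (by omega)]
    · have hm0 : (0:Int) ≤ m := by
        have := PySem.Chars.neg_one_le_find (tl.drop k'.toNat) ['\n']; omega
      rw [if_neg hm, if_neg hm]
      rw [if_pos (by omega), if_pos (by omega)]
      have hsl : PySem.List.slice (l0 ++ '\n' :: tl) (some ((L : Int) + 1 + k' + m + 1)) none
          = PySem.List.slice tl (some (k' + m + 1)) none := by
        rw [PySem.List.slice_from _ (by omega), PySem.List.slice_from _ (by omega)]
        rw [show ((L : Int) + 1 + k' + m + 1).toNat = L + 1 + (k' + m + 1).toNat by omega]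
        rw [pvDrop_right l0 tl '\n' _ (by omega)]
        congr 1; omega
      rw [hsl]

theorem pvSplit_at_mem {cs : List Char} (h : '\n' ∈ cs) :
    ∃ l0 tl, cs = l0 ++ '\n' :: tl ∧ '\n' ∉ l0 := by
  induction cs with
  | nil => simp at h
  | cons x xs ih =>
    by_cases hx : x = '\n'
    · exact ⟨[], xs, by rw [hx]; rfl, by simp⟩
    · have hxs : '\n' ∈ xs := by
        rcases List.mem_cons.mp h with h1 | h2
        · exact absurd h1.symm hx
        · exact h2
      obtain ⟨l0, tl, heq, hnot⟩ := ih hxs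
      exact ⟨x :: l0, tl, by rw [heq]; rfl, by
        simp only [List.mem_cons, not_or]
        exact ⟨fun hh => hx hh.symm, hnot⟩⟩

theorem pvCore : ∀ (n : Nat) (cs : List Char), cs.length ≤ n → pvRunA cs = pvRunB cs := by
  intro n
  induction n with
  | zero =>
    intro cs h
    have : cs = [] := List.eq_nil_of_length_eq_zero (by omega)
    subst this
    exact pvCase_noNL (by simp)
  | succ n ih =>
    intro cs h
    by_cases hn : '\n' ∈ cs
    · obtain ⟨l0, tl, heq, hnot⟩ := pvSplit_at_mem hn
      subst heq
      have htl : tl.length ≤ n := by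
        simp only [List.length_append, List.length_cons] at h; omega
      by_cases hhit : "Answer:".toList <:+: l0
      · exact pvCase_hit tl hnot hhit
      · rw [pvCase_missA tl hnot hhit, ih tl htl, ← pvCase_missB tl hnot hhit]
    · exact pvCase_noNL hn

-- ===== VERDICT (by name: the statement is the Claim_ definition above) =====
theorem mock_generate_py_spec : Claim_equal_mock_generate_py := by
  intro prompt _
  show mock_generate_py prompt = mock_generate_py_alt prompt
  exact pvCore prompt.toList.length prompt.toList le_rfl
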